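-- pv_equiv track=rewrite | github.com/khjharris/EK128 | reverse.py | reverse_sentences
-- ===== SOURCE A (Python) =====
-- def reverse_sentences(S):
--     senlist = []
--     ends = []
--     revlist = []
--     sentencedef = []
--     mid = []
--     finalstring = ""
--     for i in range(0,len(S)):
--         sentencedef.append(S[i])
--
--     for x in range(0,len(sentencedef)):
--         if x != len(sentencedef) - 1:
--             if sentencedef[x] == ".":
--                 if sentencedef[x+1] == " ":
--                     ends.append(x)
--             if sentencedef[x] == "?":
--                 if sentencedef[x+1] == " ":
--                     ends.append(x)
--             if sentencedef[x] == "!":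
--                 if sentencedef[x+1] == " ":
--                     ends.append(x)
--         if x == len(sentencedef)- 1:
--             if sentencedef[x] == ".":
--                 ends.append(x)
--             if sentencedef[x] == "?":
--                 ends.append(x)
--             if sentencedef[x] == "!":
--                 ends.append(x)
--
--     for t in range(0,len(ends)):
--         newstring = ""
--         if t == 0 :
--             for u in range(0,ends[t]+1):
--                 newstring = newstring + sentencedef[u]
--             mid.append(newstring)
--             newstring = ""
--         else:
--             for u in range(ends[t-1]+2,ends[t]+1):
--                 newstring = newstring + sentencedef[u]
--             mid.append(newstring)
--             newstring = ""
--
--     for i in reversed(mid):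
--         finalstring = finalstring + i + "\n"
--
--     return finalstring
-- ===== SOURCE B (Python) =====
-- def reverse_sentences(S):
--     sentences = []
--     current = []
--     n = len(S)
--     i = 0
--     while i < n:
--         c = S[i]
--         current.append(c)
--         if c == "." or c == "?" or c == "!":
--             if i == n - 1:
--                 sentences.append("".join(current))
--                 current = []
--             elif S[i + 1] == " ":
--                 sentences.append("".join(current))
--                 current = []
--                 i += 1
--         i += 1
--     return "".join(s + "\n" for s in reversed(sentences))
-- ===== Notes on version B (the rewrite author's own statement) =====
-- stated objective: simpler
-- what changed: A copies the string into a char list, scans it for boundary indices, then re-slices the list index-by-index per sentence; B is a single forward pass that accumulates the current sentence and emits it at each terminator followed by a space (or at end of string), skipping that space.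
import Mathlib
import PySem

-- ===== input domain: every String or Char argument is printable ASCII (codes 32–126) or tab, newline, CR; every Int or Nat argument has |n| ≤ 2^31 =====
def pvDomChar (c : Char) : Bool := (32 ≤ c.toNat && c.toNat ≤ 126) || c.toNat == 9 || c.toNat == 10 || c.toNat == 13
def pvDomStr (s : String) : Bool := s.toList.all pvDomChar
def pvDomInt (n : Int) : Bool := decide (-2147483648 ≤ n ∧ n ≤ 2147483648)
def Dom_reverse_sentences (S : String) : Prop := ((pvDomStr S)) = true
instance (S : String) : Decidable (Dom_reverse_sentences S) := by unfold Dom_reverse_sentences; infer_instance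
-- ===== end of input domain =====

-- B replaces A's four index-driven passes (char copy, boundary-index scan, per-sentence
-- index slicing) by ONE forward pass with a current-sentence accumulator; objective: simpler.

-- ===== PORT A =====
def reverse_sentences (S : String) : String :=
  let cs := S.toList
  let sentencedef : List Char :=
    (PySem.List.pyRange 0 (PySem.List.len cs) 1).foldl
      (fun acc i => acc ++ [PySem.List.pyGetD cs i ' ']) []
  let n : Int := PySem.List.len sentencedef
  let ends : List Int :=
    (PySem.List.pyRange 0 n 1).foldl
      (fun ends x =>
        let ends :=
          if x ≠ n - 1 then
            let ends := if PySem.List.pyGetD sentencedef x ' ' = '.' then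
                (if PySem.List.pyGetD sentencedef (x+1) ' ' = ' ' then ends ++ [x] else ends)
              else ends
            let ends := if PySem.List.pyGetD sentencedef x ' ' = '?' then
                (if PySem.List.pyGetD sentencedef (x+1) ' ' = ' ' then ends ++ [x] else ends)
              else ends
            let ends := if PySem.List.pyGetD sentencedef x ' ' = '!' then
                (if PySem.List.pyGetD sentencedef (x+1) ' ' = ' ' then ends ++ [x] else ends)
              else ends
            ends
          else ends
        if x = n - 1 then
          let ends := if PySem.List.pyGetD sentencedef x ' ' = '.' then ends ++ [x] else ends
          let ends := if PySem.List.pyGetD sentencedef x ' ' = '?' then ends ++ [x] else ends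
          if PySem.List.pyGetD sentencedef x ' ' = '!' then ends ++ [x] else ends
        else ends) []
  let mid : List (List Char) :=
    (PySem.List.pyRange 0 (PySem.List.len ends) 1).foldl
      (fun mid t =>
        if t = 0 then
          mid ++ [(PySem.List.pyRange 0 (PySem.List.pyGetD ends t 0 + 1) 1).foldl
                    (fun ns u => ns ++ [PySem.List.pyGetD sentencedef u ' ']) []]
        else
          mid ++ [(PySem.List.pyRange (PySem.List.pyGetD ends (t-1) 0 + 2)
                                      (PySem.List.pyGetD ends t 0 + 1) 1).foldl
                    (fun ns u => ns ++ [PySem.List.pyGetD sentencedef u ' ']) []]) []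
  let finalstring : List Char := mid.reverse.foldl (fun acc i => acc ++ i ++ ['\n']) []
  String.ofList finalstring

-- ===== PORT B =====
-- one forward pass: accumulate the current sentence, emit it at a boundary, skip the space
def altGo : List Char → List Char → List (List Char)
  | [], _ => []
  | c :: rest, cur =>
    let cur' := cur ++ [c]
    if c = '.' ∨ c = '?' ∨ c = '!' then
      match rest with
      | [] => [cur']
      | d :: rest' => if d = ' ' then cur' :: altGo rest' [] else altGo (d :: rest') cur'
    else altGo rest cur'

def reverse_sentences_alt (S : String) : String :=
  let sentences := altGo S.toList []
  String.ofList ((sentences.reverse).flatMap (fun s => s ++ ['\n']))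

-- ===== PRECONDITION & SPEC =====
def Spec_reverse_sentences (S : String) (out : String) : Prop := out = reverse_sentences_alt S
instance (S : String) (out : String) : Decidable (Spec_reverse_sentences S out) := by unfold Spec_reverse_sentences; infer_instance

-- ===== CLAIM (what is proved, stated in full; the proofs are below) =====
def Claim_equal_reverse_sentences : Prop := ∀ (S : String), Dom_reverse_sentences S → Spec_reverse_sentences S (reverse_sentences S)

-- ===== LEMMAS AND PROOFS =====

def pvPb (c : Char) : Bool := c == '.' || c == '?' || c == '!'
def pvEc (cs : List Char) : Bool :=
  match cs with
  | [] => false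
  | [c] => pvPb c
  | c :: d :: _ => pvPb c && (d == ' ')
def pvEndsNat : List Char → List Nat
  | [] => []
  | c :: rest => (if pvEc (c :: rest) then [0] else []) ++ (pvEndsNat rest).map (· + 1)
def pvChunks (cs : List Char) : List Nat → Nat → List (List Char)
  | [], _ => []
  | e :: es, s => (cs.drop s).take (e + 1 - s) :: pvChunks cs es (e + 2)
def pvStart (xs : List Nat) (s : Nat) : Nat :=
  match xs.getLast? with
  | none => s
  | some p => p + 2
def pvEndB (cs : List Char) (x : Int) : Bool :=
  if x = (cs.length : Int) - 1 then pvPb (PySem.List.pyGetD cs x ' ')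
  else pvPb (PySem.List.pyGetD cs x ' ') && (PySem.List.pyGetD cs (x+1) ' ' == ' ')

theorem pv_sentencedef (cs : List Char) :
    (PySem.List.pyRange 0 (PySem.List.len cs) 1).foldl
      (fun acc i => acc ++ [PySem.List.pyGetD cs i ' ']) [] = cs := by
  rw [PySem.List.foldl_pyRange_zero_pyGetD cs ' ' (fun acc c => acc ++ [c]) []]
  exact PySem.List.foldl_append_singleton_eq_self cs []

theorem pv_ends_body (cs : List Char) :
    (fun (ends : List Int) (x : Int) =>
        let ends :=
          if x ≠ (PySem.List.len cs) - 1 then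
            let ends := if PySem.List.pyGetD cs x ' ' = '.' then
                (if PySem.List.pyGetD cs (x+1) ' ' = ' ' then ends ++ [x] else ends)
              else ends
            let ends := if PySem.List.pyGetD cs x ' ' = '?' then
                (if PySem.List.pyGetD cs (x+1) ' ' = ' ' then ends ++ [x] else ends)
              else ends
            let ends := if PySem.List.pyGetD cs x ' ' = '!' then
                (if PySem.List.pyGetD cs (x+1) ' ' = ' ' then ends ++ [x] else ends)
              else ends
            ends
          else ends
        if x = (PySem.List.len cs) - 1 then
          let ends := if PySem.List.pyGetD cs x ' ' = '.' then ends ++ [x] else ends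
          let ends := if PySem.List.pyGetD cs x ' ' = '?' then ends ++ [x] else ends
          if PySem.List.pyGetD cs x ' ' = '!' then ends ++ [x] else ends
        else ends)
    = (fun ends x => if pvEndB cs x then ends ++ [x] else ends) := by
  funext ends x
  simp only [pvEndB, pvPb, PySem.List.len_eq]
  split_ifs <;> simp_all

theorem pv_endB_drop (cs : List Char) (x : Nat) (hx : x < cs.length) :
    pvEndB cs (x : Int) = pvEc (cs.drop x) := by
  have hd : cs.drop x = cs[x] :: cs.drop (x+1) := List.drop_eq_getElem_cons hx
  by_cases h : x = cs.length - 1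
  · have : cs.drop (x+1) = [] := by apply List.drop_eq_nil_of_le; omega
    rw [pvEndB, hd, this]
    simp [pvEc, PySem.List.pyGetD_natCast, List.getD_eq_getElem, hx]
    omega
  · have hx1 : x + 1 < cs.length := by omega
    have hd2 : cs.drop (x+1) = cs[x+1] :: cs.drop (x+2) := List.drop_eq_getElem_cons hx1
    rw [pvEndB, hd, hd2]
    have : ¬ ((x:Int) = (cs.length : Int) - 1) := by omega
    rw [if_neg this]
    have e1 : PySem.List.pyGetD cs (x:Int) ' ' = cs[x] := by
      simp [PySem.List.pyGetD_natCast, List.getD_eq_getElem, hx]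
    have e2 : PySem.List.pyGetD cs ((x:Int)+1) ' ' = cs[x+1] := by
      have : ((x:Int)+1) = ((x+1 : Nat) : Int) := by omega
      rw [this, PySem.List.pyGetD_natCast]
      simp [hx1]
    rw [e1, e2]; rfl

theorem pv_filter_range (cs : List Char) :
    (List.range cs.length).filter (fun x => pvEc (cs.drop x)) = pvEndsNat cs := by
  induction cs with
  | nil => simp [pvEndsNat]
  | cons c rest ih =>
    rw [List.length_cons, List.range_succ_eq_map, List.filter_cons, List.filter_map]
    simp only [List.drop_zero, pvEndsNat]
    have : (fun x => pvEc ((c :: rest).drop x)) ∘ (· + 1) = fun x => pvEc (rest.drop x) := by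
      funext x; simp
    rw [this, ih]
    by_cases h : pvEc (c :: rest) <;> simp [h]

theorem pv_endsNat_lt (cs : List Char) : ∀ e ∈ pvEndsNat cs, e < cs.length := by
  induction cs with
  | nil => simp [pvEndsNat]
  | cons c rest ih =>
    intro e he
    simp only [pvEndsNat, List.mem_append, List.mem_map] at he
    rcases he with he | ⟨a, ha, rfl⟩
    · split at he <;> simp_all
    · have := ih a ha; simp; omega

theorem pv_chunks_shift (x : Char) (cs : List Char) (es : List Nat) : ∀ (s : Nat),
    pvChunks (x :: cs) (es.map (· + 1)) (s + 1) = pvChunks cs es s := by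
  induction es with
  | nil => intro s; rfl
  | cons e es ih =>
    intro s
    simp only [List.map_cons, pvChunks, List.drop_succ_cons]
    have h1 : e + 1 + 1 - (s + 1) = e + 1 - s := by omega
    have h2 : e + 1 + 2 = (e + 2) + 1 := by omega
    rw [h1, h2, ih]

theorem pv_chunks_snoc (cs : List Char) (xs : List Nat) (e : Nat) : ∀ (s : Nat),
    pvChunks cs (xs ++ [e]) s
      = pvChunks cs xs s ++ [(cs.drop (pvStart xs s)).take (e + 1 - pvStart xs s)] := by
  induction xs with
  | nil => intro s; simp [pvChunks, pvStart]
  | cons x xs ih =>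
    intro s
    simp only [List.cons_append, pvChunks, ih (x+2), List.cons_append]
    congr 2
    cases xs with
    | nil => simp [pvStart]
    | cons y ys =>
      have hp : (y :: ys).getLast? = some ((y :: ys).getLast (by simp)) := by
        simp [List.getLast?_eq_some_getLast]
      simp [pvStart, hp]

theorem pv_inner_map (cs : List Char) (d : Char) (a : Nat) : ∀ (m : Nat), a + m ≤ cs.length →
    (List.range m).map (fun k => cs.getD (a + k) d) = (cs.drop a).take m := by
  intro m
  induction m with
  | zero => intro _; simp
  | succ m ih =>
    intro h
    rw [List.range_succ, List.map_append, ih (by omega), List.take_succ]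
    simp only [List.map_cons, List.map_nil]
    congr 1
    have hm : a + m < cs.length := by omega
    rw [List.getElem?_drop, List.getElem?_eq_getElem hm, List.getD_eq_getElem _ _ hm]
    rfl

theorem pv_inner (cs : List Char) (a b : Nat) (hb : b ≤ cs.length) :
    (PySem.List.pyRange (a : Int) (b : Int) 1).foldl
      (fun ns u => ns ++ [PySem.List.pyGetD cs u ' ']) [] = (cs.drop a).take (b - a) := by
  rw [PySem.List.foldl_append_singleton_eq_map, PySem.List.pyRange_one]
  rcases le_or_gt b a with h | h
  · have h1 : ((b:Int) - (a:Int)).toNat = 0 := by omega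
    have h2 : b - a = 0 := by omega
    rw [h1, h2]
    simp
  · have h1 : ((b:Int) - (a:Int)).toNat = b - a := by omega
    rw [h1, ← pv_inner_map cs ' ' a (b-a) (by omega)]
    simp only [List.map_map]
    apply List.map_congr_left
    intro k hk
    simp only [List.mem_range] at hk
    have hc : (a:Int) + (k:Int) = ((a+k : Nat) : Int) := by omega
    show PySem.List.pyGetD cs ((a:Int) + (k:Int)) ' ' = _
    rw [hc, PySem.List.pyGetD_natCast]


def pvSplit : List Char → List (List Char)
  | [] => []
  | [c] => if pvPb c then [[c]] else []
  | c :: d :: rest =>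
    if pvPb c && (d == ' ') then [c] :: pvSplit rest
    else match pvSplit (d :: rest) with
      | [] => []
      | h :: t => (c :: h) :: t

theorem pv_pb_iff (c : Char) : pvPb c = true ↔ (c = '.' ∨ c = '?' ∨ c = '!') := by
  simp [pvPb, or_assoc]

theorem pv_altGo_split (cs : List Char) : ∀ cur,
    altGo cs cur = match pvSplit cs with
      | [] => []
      | h :: t => (cur ++ h) :: t := by
  induction cs using pvSplit.induct with
  | case1 => intro cur; rfl
  | case2 c hpb =>
    intro cur
    have hp : c = '.' ∨ c = '?' ∨ c = '!' := (pv_pb_iff c).mp hpb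
    simp [altGo, pvSplit, hpb, hp]
  | case3 c hpb =>
    intro cur
    have hp : ¬ (c = '.' ∨ c = '?' ∨ c = '!') := fun h => hpb ((pv_pb_iff c).mpr h)
    simp [altGo, pvSplit, hpb, hp]
  | case4 c d rest hcond ih =>
    intro cur
    have hc : pvPb c = true := by simp_all
    have hd : d = ' ' := by simp_all
    have hp : c = '.' ∨ c = '?' ∨ c = '!' := (pv_pb_iff c).mp hc
    have hrest : altGo rest [] = pvSplit rest := by
      rw [ih []]; cases pvSplit rest <;> simp
    simp [altGo, pvSplit, hcond, hc, hp, hd, hrest]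
  | case5 c d rest hcond hnil ih =>
    intro cur
    have hstep : altGo (c :: d :: rest) cur = altGo (d :: rest) (cur ++ [c]) := by
      by_cases hp : c = '.' ∨ c = '?' ∨ c = '!'
      · have hd : ¬ d = ' ' := by
          intro hd0
          exact hcond (by simp [hd0, (pv_pb_iff c).mpr hp])
        simp [altGo, hp, hd]
      · simp [altGo, hp]
    rw [hstep, ih, hnil]
    simp [pvSplit, hcond, hnil]
  | case6 c d rest hcond h t hht ih =>
    intro cur
    have hstep : altGo (c :: d :: rest) cur = altGo (d :: rest) (cur ++ [c]) := by
      by_cases hp : c = '.' ∨ c = '?' ∨ c = '!'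
      · have hd : ¬ d = ' ' := by
          intro hd0
          exact hcond (by simp [hd0, (pv_pb_iff c).mpr hp])
        simp [altGo, hp, hd]
      · simp [altGo, hp]
    rw [hstep, ih, hht]
    simp [pvSplit, hcond, hht]

theorem pv_ec_space (rest : List Char) : pvEc (' ' :: rest) = false := by
  cases rest <;> simp [pvEc, pvPb]

theorem pv_chunks_split (cs : List Char) :
    pvChunks cs (pvEndsNat cs) 0 = pvSplit cs := by
  induction cs using pvSplit.induct with
  | case1 => rfl
  | case2 c hpb =>
    simp [pvEndsNat, pvEc, hpb, pvChunks, pvSplit]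
  | case3 c hpb =>
    simp [pvEndsNat, pvEc, hpb, pvChunks, pvSplit]
  | case4 c d rest hcond ih =>
    have hc : pvPb c = true := by simp_all
    have hd : d = ' ' := by simp_all
    subst hd
    have hec : pvEc (c :: ' ' :: rest) = true := by simp [pvEc, hc]
    have h1 : pvEndsNat (c :: ' ' :: rest)
        = 0 :: ((pvEndsNat rest).map (· + 1)).map (· + 1) := by
      simp [pvEndsNat, hec, pv_ec_space, List.map_map]
    rw [h1]
    simp only [pvChunks, List.drop_zero, pvSplit, hcond, if_true, Nat.sub_zero]
    have hh : List.take (0 + 1) (c :: ' ' :: rest) = [c] := rfl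
    rw [hh]
    have e1 := pv_chunks_shift c (' ' :: rest) ((pvEndsNat rest).map (· + 1)) 1
    have e2 := pv_chunks_shift ' ' rest (pvEndsNat rest) 0
    rw [show (0:Nat) + 2 = 1 + 1 from rfl, e1, show (1:Nat) = 0 + 1 from rfl, e2, ih]
  | case5 c d rest hcond hnil ih =>
    have hec : pvEc (c :: d :: rest) = false := by
      simp [pvEc]; intro h1 h2; exact hcond (by simp [h1, h2])
    have h1 : pvEndsNat (c :: d :: rest) = (pvEndsNat (d :: rest)).map (· + 1) := by
      simp [pvEndsNat, hec]
    have hE : pvEndsNat (d :: rest) = [] := by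
      have := ih; rw [hnil] at this
      cases hE : pvEndsNat (d :: rest) with
      | nil => rfl
      | cons e es => rw [hE] at this; simp [pvChunks] at this
    rw [h1, hE]
    simp [pvChunks, pvSplit, hcond, hnil]
  | case6 c d rest hcond h t hht ih =>
    have hec : pvEc (c :: d :: rest) = false := by
      simp [pvEc]; intro h1 h2; exact hcond (by simp [h1, h2])
    have h1 : pvEndsNat (c :: d :: rest) = (pvEndsNat (d :: rest)).map (· + 1) := by
      simp [pvEndsNat, hec]
    rw [hht] at ih
    cases hE : pvEndsNat (d :: rest) with
    | nil => rw [hE] at ih; simp [pvChunks] at ih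
    | cons e es =>
      rw [hE] at ih
      simp only [pvChunks, List.drop_zero] at ih
      rw [h1, hE]
      simp only [List.map_cons, pvChunks, List.drop_zero, pvSplit, hcond, if_neg hcond, hht]
      have hhead : List.take (e + 1 + 1 - 0) (c :: d :: rest) = c :: h := by
        have : List.take (e + 1 - 0) (d :: rest) = h := (List.cons.injEq _ _ _ _ ▸ ih).1
        simp only [Nat.sub_zero] at this ⊢
        rw [List.take_succ_cons, this]
      have htail : pvChunks (c :: d :: rest) (es.map (· + 1)) (e + 1 + 2) = t := by
        have hsh : e + 1 + 2 = (e + 2) + 1 := by omega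
        rw [hsh, pv_chunks_shift]
        exact (List.cons.injEq _ _ _ _ ▸ ih).2
      rw [hhead, htail]
      simp

theorem pv_es_get (esN : List Nat) (k : Nat) (hk : k < esN.length) :
    PySem.List.pyGetD (esN.map (Int.ofNat)) (k : Int) 0 = (esN[k] : Int) := by
  simp [PySem.List.pyGetD_natCast, hk]

theorem pv_start_take (esN : List Nat) (m : Nat) (h1 : 0 < m) (h2 : m ≤ esN.length) :
    pvStart (esN.take m) 0 = esN[m-1]'(by omega) + 2 := by
  unfold pvStart
  rw [List.getLast?_eq_getElem?]
  have hlen : (esN.take m).length = m := by simp; omega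
  rw [hlen, List.getElem?_take]
  simp only [if_pos (by omega : m - 1 < m)]
  rw [List.getElem?_eq_getElem (by omega)]

theorem pv_mid_aux (cs : List Char) (esN : List Nat) (he : ∀ e ∈ esN, e < cs.length) :
    ∀ m, m ≤ esN.length →
    (PySem.List.pyRange 0 (m : Int) 1).foldl
      (fun mid t =>
        if t = 0 then
          mid ++ [(PySem.List.pyRange 0 (PySem.List.pyGetD (esN.map (Int.ofNat)) t 0 + 1) 1).foldl
                    (fun ns u => ns ++ [PySem.List.pyGetD cs u ' ']) []]
        else
          mid ++ [(PySem.List.pyRange (PySem.List.pyGetD (esN.map (Int.ofNat)) (t-1) 0 + 2)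
                                      (PySem.List.pyGetD (esN.map (Int.ofNat)) t 0 + 1) 1).foldl
                    (fun ns u => ns ++ [PySem.List.pyGetD cs u ' ']) []]) []
    = pvChunks cs (esN.take m) 0 := by
  intro m
  induction m with
  | zero =>
    intro _
    rw [PySem.List.pyRange_one_eq_nil (by omega)]
    rfl
  | succ m ih =>
    intro hm
    have hmlt : m < esN.length := by omega
    have hsplit : PySem.List.pyRange 0 ((m+1 : Nat) : Int) 1
        = PySem.List.pyRange 0 (m : Int) 1 ++ [(m : Int)] := by
      have : ((m+1 : Nat) : Int) = (m : Int) + 1 := by omega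
      rw [this, PySem.List.pyRange_one_succ_right (by omega)]
    rw [hsplit, List.foldl_append, ih (by omega)]
    have htake : esN.take (m+1) = esN.take m ++ [esN[m]] := by
      rw [List.take_add_one, List.getElem?_eq_getElem hmlt]
      rfl
    rw [htake, pv_chunks_snoc]
    simp only [List.foldl_cons, List.foldl_nil]
    by_cases hm0 : m = 0
    · subst hm0
      rw [if_pos (show ((0:Nat):Int) = 0 by norm_num)]
      rw [pv_es_get esN 0 hmlt]
      have hin := pv_inner cs 0 (esN[0]+1) (by have := he esN[0] (List.getElem_mem _); omega)
      push_cast at hin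
      rw [hin]
      have hst : pvStart (esN.take 0) 0 = 0 := rfl
      rw [hst]
      norm_num
    · have hne : ((m : Int)) ≠ 0 := by omega
      rw [if_neg hne]
      have hm1 : m - 1 < esN.length := by omega
      have hc1 : (m : Int) - 1 = ((m - 1 : Nat) : Int) := by omega
      have hg1 : PySem.List.pyGetD (esN.map (Int.ofNat)) ((m : Int) - 1) 0 = (esN[m-1] : Int) := by
        rw [hc1]; exact pv_es_get esN (m-1) hm1
      have hg2 : PySem.List.pyGetD (esN.map (Int.ofNat)) ((m : Int)) 0 = (esN[m] : Int) := pv_es_get esN m hmlt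
      rw [hg1, hg2]
      have hin := pv_inner cs (esN[m-1]+2) (esN[m]+1) (by have := he esN[m] (List.getElem_mem _); omega)
      push_cast at hin
      rw [hin]
      rw [pv_start_take esN m (by omega) (by omega)]
      congr 3
      omega

theorem pv_altGo_nil (cs : List Char) : altGo cs [] = pvSplit cs := by
  rw [pv_altGo_split cs []]
  cases pvSplit cs <;> simp

theorem pv_ends_filter (cs : List Char) :
    (PySem.List.pyRange 0 (PySem.List.len cs) 1).filter (pvEndB cs)
      = (pvEndsNat cs).map Int.ofNat := by
  rw [PySem.List.len_eq, PySem.List.pyRange_zero_nat, List.filter_map]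
  have h1 : (List.range cs.length).filter (pvEndB cs ∘ fun (n : Nat) => (n : Int))
      = (List.range cs.length).filter (fun x => pvEc (cs.drop x)) := by
    apply List.filter_congr
    intro x hx
    simp only [List.mem_range] at hx
    exact pv_endB_drop cs x hx
  rw [h1, pv_filter_range]
  rfl

theorem pv_mid (cs : List Char) (esN : List Nat) (he : ∀ e ∈ esN, e < cs.length) :
    (PySem.List.pyRange 0 (PySem.List.len (esN.map (Int.ofNat))) 1).foldl
      (fun mid t =>
        if t = 0 then
          mid ++ [(PySem.List.pyRange 0 (PySem.List.pyGetD (esN.map (Int.ofNat)) t 0 + 1) 1).foldl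
                    (fun ns u => ns ++ [PySem.List.pyGetD cs u ' ']) []]
        else
          mid ++ [(PySem.List.pyRange (PySem.List.pyGetD (esN.map (Int.ofNat)) (t-1) 0 + 2)
                                      (PySem.List.pyGetD (esN.map (Int.ofNat)) t 0 + 1) 1).foldl
                    (fun ns u => ns ++ [PySem.List.pyGetD cs u ' ']) []]) []
    = pvChunks cs esN 0 := by
  have h := pv_mid_aux cs esN he esN.length (le_refl _)
  rw [List.take_length] at h
  have hl : PySem.List.len (esN.map (Int.ofNat)) = ((esN.length : Nat) : Int) := by simp
  rw [hl]
  exact h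

-- ===== VERDICT (by name: the statement is the Claim_ definition above) =====
theorem reverse_sentences_spec : Claim_equal_reverse_sentences := by
  intro S _
  unfold Spec_reverse_sentences
  simp only [reverse_sentences, reverse_sentences_alt]
  rw [pv_sentencedef, pv_ends_body, PySem.List.foldl_append_if_eq_filter, List.nil_append,
      pv_ends_filter, pv_mid _ _ (pv_endsNat_lt _), pv_chunks_split, ← pv_altGo_nil]
  congr 1
  rw [show (fun (acc i : List Char) => acc ++ i ++ ['\n'])
        = (fun acc i => acc ++ (i ++ ['\n']))
      from funext fun a => funext fun b => by rw [List.append_assoc]]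
  rw [PySem.List.foldl_append_eq_flatMap, List.nil_append]
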